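-- pv_equiv track=rewrite | github.com/Chunws13/Study | Implement/18685.py | gernerate
-- ===== SOURCE A (Python) =====
-- def gernerate(start, gen, target_gen):
--     if gen == target_gen:
--         return start
--
--     else:
--         tmp_list = [start[-1]]
--
--         for s in range(len(start)-1, 0, -1):
--             row_diff, col_diff = start[s][0] - start[s-1][0], start[s][1] - start[s-1][1]
--             tmp_list.append([tmp_list[-1][0] - col_diff, tmp_list[-1][1] + row_diff])
--
--         start += tmp_list[1:]
--         return gernerate(start, gen+1, target_gen)
-- ===== SOURCE B (Python) =====
-- def gernerate(start, gen, target_gen):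
--     for _ in range(target_gen - gen):
--         pr, pc = start[-1][0], start[-1][1]
--         start += [[pr + q[1] - pc, pc + pr - q[0]] for q in reversed(start[:-1])]
--     return start
-- ===== Notes on version B (the rewrite author's own statement) =====
-- stated objective: alternative
-- what changed: B replaces A's recursion with an iterative loop and builds each doubling's new half by a direct rotate-about-the-last-point formula applied to the reversed prefix, instead of A's chained consecutive-difference construction.
-- outside the precondition, e.g. on gernerate([[6]], 0, 2): A returns [[6]], B raises IndexError
import Mathlib
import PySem

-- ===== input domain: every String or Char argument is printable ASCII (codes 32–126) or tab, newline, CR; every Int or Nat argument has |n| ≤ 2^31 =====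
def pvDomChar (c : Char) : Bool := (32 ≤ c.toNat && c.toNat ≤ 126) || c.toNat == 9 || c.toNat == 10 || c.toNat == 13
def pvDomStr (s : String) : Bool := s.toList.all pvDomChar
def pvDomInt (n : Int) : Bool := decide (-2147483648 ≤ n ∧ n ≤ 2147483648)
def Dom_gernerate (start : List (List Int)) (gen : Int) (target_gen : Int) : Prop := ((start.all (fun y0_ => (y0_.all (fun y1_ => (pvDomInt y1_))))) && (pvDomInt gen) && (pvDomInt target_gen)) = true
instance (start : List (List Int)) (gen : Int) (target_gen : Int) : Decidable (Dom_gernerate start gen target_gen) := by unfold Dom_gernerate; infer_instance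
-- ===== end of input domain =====

-- B replaces A's recursion with an iterative loop and replaces the chained-difference
-- construction of the new half by a direct rotate-about-the-pivot formula per point
-- (objective: alternative/simpler decomposition). Equivalence is about the return value;
-- both Pythons extend `start` in place identically.

-- ===== PORT A =====
-- A's recursion runs (target_gen - gen) levels inside Pre_; the Nat fuel only makes it total.
def gernerateA : Nat → List (List Int) → Int → Int → List (List Int)
  | 0, start, _, _ => start
  | fuel+1, start, gen, target_gen =>
    if gen == target_gen then start
    else
      let tmp_list : List (List Int) := [PySem.List.pyGetD start (-1) []]
      let tmp_list :=
        (PySem.List.pyRange ((start.length : Int) - 1) 0 (-1)).foldl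
          (fun tmp s =>
            let row_diff := PySem.List.pyGetD (PySem.List.pyGetD start s []) 0 0
                          - PySem.List.pyGetD (PySem.List.pyGetD start (s-1) []) 0 0
            let col_diff := PySem.List.pyGetD (PySem.List.pyGetD start s []) 1 0
                          - PySem.List.pyGetD (PySem.List.pyGetD start (s-1) []) 1 0
            tmp ++ [[PySem.List.pyGetD (PySem.List.pyGetD tmp (-1) []) 0 0 - col_diff,
                     PySem.List.pyGetD (PySem.List.pyGetD tmp (-1) []) 1 0 + row_diff]])
          tmp_list
      gernerateA fuel (start ++ tmp_list.drop 1) (gen+1) target_gen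

def gernerate (start : List (List Int)) (gen : Int) (target_gen : Int) : List (List Int) :=
  gernerateA (target_gen - gen).toNat start gen target_gen

-- ===== PORT B =====
def gernerate_alt (start : List (List Int)) (gen : Int) (target_gen : Int) : List (List Int) :=
  (PySem.List.pyRange 0 (target_gen - gen) 1).foldl
    (fun st _ =>
      let p := PySem.List.pyGetD st (-1) []
      let pr := PySem.List.pyGetD p 0 0
      let pc := PySem.List.pyGetD p 1 0
      st ++ ((PySem.List.slice st none (some (-1))).reverse).map
        (fun q => [pr + PySem.List.pyGetD q 1 0 - pc, pc + pr - PySem.List.pyGetD q 0 0]))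
    start

-- ===== PRECONDITION & SPEC =====
-- Pre_ excludes gen > target_gen (A recurses forever: RecursionError) and, when at least one
-- doubling happens, an empty start or a row of fewer than two coordinates: there A raises
-- IndexError, except the degenerate single short row (e.g. [[6]]), which A returns unchanged
-- because its loop body never runs, while B reads the pivot's two coordinates and raises.
def Pre_gernerate (start : List (List Int)) (gen : Int) (target_gen : Int) : Prop :=
  gen ≤ target_gen ∧ (gen = target_gen ∨ (start ≠ [] ∧ ∀ r ∈ start, 2 ≤ r.length))
instance (start : List (List Int)) (gen : Int) (target_gen : Int) : Decidable (Pre_gernerate start gen target_gen) := by unfold Pre_gernerate; infer_instance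

def pvWitness_gernerate : List (List Int) × Int × Int := ([[0, 0], [0, 1]], 1, 3)

def Spec_gernerate (start : List (List Int)) (gen : Int) (target_gen : Int) (out : List (List Int)) : Prop := out = gernerate_alt start gen target_gen
instance (start : List (List Int)) (gen : Int) (target_gen : Int) (out : List (List Int)) : Decidable (Spec_gernerate start gen target_gen out) := by unfold Spec_gernerate; infer_instance

-- ===== CLAIM (what is proved, stated in full; the proofs are below) =====
def Claim_equal_gernerate : Prop := ∀ (start : List (List Int)) (gen : Int) (target_gen : Int), Dom_gernerate start gen target_gen → Pre_gernerate start gen target_gen → Spec_gernerate start gen target_gen (gernerate start gen target_gen)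

-- ===== LEMMAS AND PROOFS =====

-- the rotate-about-the-pivot map B applies to each point
def pvRot (pr pc : Int) (q : List Int) : List Int :=
  [pr + PySem.List.pyGetD q 1 0 - pc, pc + pr - PySem.List.pyGetD q 0 0]

-- one doubling step, as B computes it
def pvStep (st : List (List Int)) : List (List Int) :=
  st ++ (st.dropLast.reverse).map (pvRot (PySem.List.pyGetD (PySem.List.pyGetD st (-1) []) 0 0)
                                         (PySem.List.pyGetD (PySem.List.pyGetD st (-1) []) 1 0))

-- A's inner-loop body, lets written out
def pvBody (start : List (List Int)) (tmp : List (List Int)) (s : Int) : List (List Int) :=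
  tmp ++ [[PySem.List.pyGetD (PySem.List.pyGetD tmp (-1) []) 0 0
             - (PySem.List.pyGetD (PySem.List.pyGetD start s []) 1 0
                - PySem.List.pyGetD (PySem.List.pyGetD start (s-1) []) 1 0),
           PySem.List.pyGetD (PySem.List.pyGetD tmp (-1) []) 1 0
             + (PySem.List.pyGetD (PySem.List.pyGetD start s []) 0 0
                - PySem.List.pyGetD (PySem.List.pyGetD start (s-1) []) 0 0)]]

theorem pvStep_ne_nil (st : List (List Int)) (h : st ≠ []) : pvStep st ≠ [] := by
  unfold pvStep
  intro hc
  exact h (List.append_eq_nil_iff.1 hc).1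

theorem foldl_ignore_iterate (l : List Int) (g : List (List Int) → List (List Int))
    (s : List (List Int)) : l.foldl (fun st _ => g st) s = g^[l.length] s := by
  induction l generalizing s with
  | nil => rfl
  | cons a l ih => simp [List.foldl_cons, ih, Function.iterate_succ_apply]

theorem alt_eq_iterate (start : List (List Int)) (gen target_gen : Int) :
    gernerate_alt start gen target_gen = pvStep^[(target_gen - gen).toNat] start := by
  unfold gernerate_alt
  have hb : (fun (st : List (List Int)) (_ : Int) =>
      st ++ ((PySem.List.slice st none (some (-1))).reverse).map
        (fun q => [PySem.List.pyGetD (PySem.List.pyGetD st (-1) []) 0 0 + PySem.List.pyGetD q 1 0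
                     - PySem.List.pyGetD (PySem.List.pyGetD st (-1) []) 1 0,
                   PySem.List.pyGetD (PySem.List.pyGetD st (-1) []) 1 0
                     + PySem.List.pyGetD (PySem.List.pyGetD st (-1) []) 0 0
                     - PySem.List.pyGetD q 0 0]))
      = (fun st _ => pvStep st) := by
    funext st _
    unfold pvStep pvRot
    rw [PySem.List.slice_to_neg_one]
  rw [show (fun (st : List (List Int)) (_ : Int) =>
      let p := PySem.List.pyGetD st (-1) []
      let pr := PySem.List.pyGetD p 0 0
      let pc := PySem.List.pyGetD p 1 0
      st ++ ((PySem.List.slice st none (some (-1))).reverse).map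
        (fun q => [pr + PySem.List.pyGetD q 1 0 - pc, pc + pr - PySem.List.pyGetD q 0 0]))
      = (fun st _ => pvStep st) from hb]
  rw [foldl_ignore_iterate, PySem.List.length_pyRange_one]
  norm_num

-- the inner fold builds the rotated reversed prefix
theorem inner_fold (start : List (List Int)) (pr pc : Int) :
    ∀ (m : Nat), m < start.length → ∀ (acc : List (List Int)),
      PySem.List.pyGetD (PySem.List.pyGetD acc (-1) []) 0 0
        = pr + PySem.List.pyGetD (start.getD m []) 1 0 - pc →
      PySem.List.pyGetD (PySem.List.pyGetD acc (-1) []) 1 0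
        = pc + pr - PySem.List.pyGetD (start.getD m []) 0 0 →
      (PySem.List.pyRange (m : Int) 0 (-1)).foldl (pvBody start) acc
        = acc ++ ((start.take m).reverse).map (pvRot pr pc) := by
  intro m
  induction m with
  | zero =>
    intro _ acc _ _
    rw [PySem.List.pyRange_neg_one_eq_nil (by norm_num)]
    simp
  | succ m ih =>
    intro hm acc h0 h1
    rw [PySem.List.pyRange_neg_one_cons (by positivity)]
    have hcast : ((m + 1 : Nat) : Int) - 1 = (m : Nat) := by push_cast; ring
    rw [List.foldl_cons, hcast]
    have hbody : pvBody start acc ((m+1 : Nat) : Int)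
        = acc ++ [pvRot pr pc (start.getD m [])] := by
      unfold pvBody pvRot
      rw [show ((m + 1 : Nat) : Int) - 1 = ((m : Nat) : Int) from hcast]
      rw [PySem.List.pyGetD_natCast, PySem.List.pyGetD_natCast, h0, h1]
      have c0 : pr + PySem.List.pyGetD (start.getD (m+1) []) 1 0 - pc
            - (PySem.List.pyGetD (start.getD (m+1) []) 1 0 - PySem.List.pyGetD (start.getD m []) 1 0)
          = pr + PySem.List.pyGetD (start.getD m []) 1 0 - pc := by ring
      have c1 : pc + pr - PySem.List.pyGetD (start.getD (m+1) []) 0 0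
            + (PySem.List.pyGetD (start.getD (m+1) []) 0 0 - PySem.List.pyGetD (start.getD m []) 0 0)
          = pc + pr - PySem.List.pyGetD (start.getD m []) 0 0 := by ring
      rw [c0, c1]
    rw [hbody]
    have hlast : PySem.List.pyGetD (acc ++ [pvRot pr pc (start.getD m [])]) (-1) []
        = pvRot pr pc (start.getD m []) := PySem.List.pyGetD_neg_one_append_singleton _ _ _
    have e0 : PySem.List.pyGetD (pvRot pr pc (start.getD m [])) 0 0
        = pr + PySem.List.pyGetD (start.getD m []) 1 0 - pc := by
      unfold pvRot
      simp [PySem.List.pyGetD_zero_cons]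
    have e1 : PySem.List.pyGetD (pvRot pr pc (start.getD m [])) 1 0
        = pc + pr - PySem.List.pyGetD (start.getD m []) 0 0 := by
      unfold pvRot
      simp [PySem.List.pyGetD]
    rw [ih (by omega) _ (by rw [hlast, e0]) (by rw [hlast, e1])]
    have htake : (start.take (m+1)).reverse
        = start.getD m [] :: (start.take m).reverse := by
      have hmlt : m < start.length := by omega
      have : start[m]? = some (start.getD m []) := by
        rw [List.getD_eq_getElem _ _ hmlt]
        exact List.getElem?_eq_getElem hmlt
      rw [List.take_succ, this]
      simp
    rw [htake]
    simp

-- one level of A equals one pvStep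
theorem stepA_eq (start : List (List Int)) (hne : start ≠ []) :
    start ++
      ((PySem.List.pyRange ((start.length : Int) - 1) 0 (-1)).foldl (pvBody start)
        [PySem.List.pyGetD start (-1) []]).drop 1
      = pvStep start := by
  have hn : 1 ≤ start.length := List.length_pos_iff.2 hne
  have hcast : ((start.length : Int) - 1) = ((start.length - 1 : Nat) : Int) := by
    push_cast [hn]; ring
  set pr := PySem.List.pyGetD (PySem.List.pyGetD start (-1) []) 0 0 with hpr
  set pc := PySem.List.pyGetD (PySem.List.pyGetD start (-1) []) 1 0 with hpc
  have hlastD : PySem.List.pyGetD start (-1) [] = start.getD (start.length - 1) [] := by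
    rw [PySem.List.pyGetD_neg_one _ _ hne]
    rw [List.getD_eq_getElem _ _ (by omega), List.getLast_eq_getElem]
  have hacc : PySem.List.pyGetD ([PySem.List.pyGetD start (-1) []] : List (List Int)) (-1) []
      = PySem.List.pyGetD start (-1) [] := by
    rw [PySem.List.pyGetD_neg_one _ _ (List.cons_ne_nil _ _)]
    rfl
  rw [hcast, inner_fold start pr pc (start.length - 1) (by omega)
        [PySem.List.pyGetD start (-1) []]
        (by rw [hacc, ← hlastD]; ring)
        (by rw [hacc, ← hlastD]; ring)]
  unfold pvStep
  rw [List.dropLast_eq_take]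
  simp
  rw [← hpr, ← hpc]

theorem genA_eq_iterate (k : Nat) :
    ∀ (start : List (List Int)) (gen target_gen : Int),
      target_gen - gen = (k : Int) →
      (k = 0 ∨ start ≠ []) →
      gernerateA k start gen target_gen = pvStep^[k] start := by
  induction k with
  | zero => intro start gen tg _ _; rfl
  | succ k ih =>
    intro start gen tg hk hinv
    have hne : start ≠ [] := hinv.resolve_left (by omega)
    have hgen : gen ≠ tg := by omega
    have hred : gernerateA (k+1) start gen tg
        = gernerateA k (start ++
            ((PySem.List.pyRange ((start.length : Int) - 1) 0 (-1)).foldl (pvBody start)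
              [PySem.List.pyGetD start (-1) []]).drop 1) (gen+1) tg := by
      show (if gen == tg then start else _) = _
      rw [if_neg (by simp [hgen])]
      rfl
    rw [hred, stepA_eq start hne,
        ih (pvStep start) (gen+1) tg (by omega) (Or.inr (pvStep_ne_nil start hne)),
        ← Function.iterate_succ_apply]

-- ===== VERDICT (by name: the statement is the Claim_ definition above) =====
theorem gernerate_spec : Claim_equal_gernerate := by
  intro start gen target_gen _ hpre
  unfold Spec_gernerate gernerate
  rcases hpre with ⟨_hle, hcase⟩
  rw [alt_eq_iterate start gen target_gen]
  rcases hcase with heq | ⟨hne, _⟩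
  · have : (target_gen - gen).toNat = 0 := by omega
    rw [this]; rfl
  · exact genA_eq_iterate _ start gen target_gen (by omega) (Or.inr hne)
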